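-- pv_equiv track=rewrite | github.com/dbaltaza/PythonModule03 | ex3/ft_achievement_tracker.py | find_rare_achievements
-- ===== SOURCE A (Python) =====
-- def find_rare_achievements(
--     all_achievements: set[str],
--     alice: set[str],
--     bob: set[str],
--     charlie: set[str],
-- ) -> set[str]:
--     rare: set[str] = set()
--     for achievement in all_achievements:
--         count = 0
--         if achievement in alice:
--             count += 1
--         if achievement in bob:
--             count += 1
--         if achievement in charlie:
--             count += 1
--         if count == 1:
--             rare.add(achievement)
--     return rare
-- ===== SOURCE B (Python) =====
-- def find_rare_achievements(
--     all_achievements: set[str],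
--     alice: set[str],
--     bob: set[str],
--     charlie: set[str],
-- ) -> set[str]:
--     exactly_one = (alice - bob - charlie) | (bob - alice - charlie) | (charlie - alice - bob)
--     return all_achievements & exactly_one
-- ===== Notes on version B (the rewrite author's own statement) =====
-- stated objective: simpler
-- what changed: Replaced the element-by-element loop with a membership counter by whole-set algebra: the union of the three pairwise set differences gives the achievements owned by exactly one player, intersected with all_achievements.
import Mathlib
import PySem

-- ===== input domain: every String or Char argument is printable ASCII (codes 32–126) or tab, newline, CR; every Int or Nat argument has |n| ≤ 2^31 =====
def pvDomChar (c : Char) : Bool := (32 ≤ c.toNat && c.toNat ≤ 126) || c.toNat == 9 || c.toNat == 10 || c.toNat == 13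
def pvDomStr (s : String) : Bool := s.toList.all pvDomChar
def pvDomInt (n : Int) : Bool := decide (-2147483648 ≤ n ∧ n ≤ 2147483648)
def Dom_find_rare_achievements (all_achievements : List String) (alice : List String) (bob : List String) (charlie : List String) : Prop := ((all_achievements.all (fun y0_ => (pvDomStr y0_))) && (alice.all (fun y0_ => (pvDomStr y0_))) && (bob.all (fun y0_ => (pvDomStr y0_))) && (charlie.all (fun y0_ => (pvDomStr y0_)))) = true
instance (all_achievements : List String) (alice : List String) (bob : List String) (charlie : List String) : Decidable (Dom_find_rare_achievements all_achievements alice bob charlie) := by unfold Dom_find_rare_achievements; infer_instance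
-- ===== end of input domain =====

-- B replaces A's per-element loop with a counter by whole-set algebra (union of pairwise differences, intersected with the master set); objective: simpler.


-- ===== PORT A =====
def find_rare_achievements (all_achievements : List String) (alice : List String) (bob : List String) (charlie : List String) : List String :=
  all_achievements.foldl (fun rare achievement =>
    let count : Int := 0
    let count := if PySem.Set.contains alice achievement then count + 1 else count
    let count := if PySem.Set.contains bob achievement then count + 1 else count
    let count := if PySem.Set.contains charlie achievement then count + 1 else count
    if count = 1 then PySem.Set.add rare achievement else rare) PySem.Set.empty

-- ===== PORT B =====
def find_rare_achievements_alt (all_achievements : List String) (alice : List String) (bob : List String) (charlie : List String) : List String :=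
  let exactly_one :=
    PySem.Set.union
      (PySem.Set.union
        (PySem.Set.diff (PySem.Set.diff (PySem.Set.ofList alice) bob) charlie)
        (PySem.Set.diff (PySem.Set.diff (PySem.Set.ofList bob) alice) charlie))
      (PySem.Set.diff (PySem.Set.diff (PySem.Set.ofList charlie) alice) bob)
  PySem.Set.inter (PySem.Set.ofList all_achievements) exactly_one

-- ===== PRECONDITION & SPEC =====
def Spec_find_rare_achievements (all_achievements : List String) (alice : List String) (bob : List String) (charlie : List String) (out : List String) : Prop := out = find_rare_achievements_alt all_achievements alice bob charlie
instance (all_achievements : List String) (alice : List String) (bob : List String) (charlie : List String) (out : List String) : Decidable (Spec_find_rare_achievements all_achievements alice bob charlie out) := by unfold Spec_find_rare_achievements; infer_instance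

-- ===== CLAIM (what is proved, stated in full; the proofs are below) =====
def Claim_equal_find_rare_achievements : Prop := ∀ (all_achievements : List String) (alice : List String) (bob : List String) (charlie : List String), Dom_find_rare_achievements all_achievements alice bob charlie → Spec_find_rare_achievements all_achievements alice bob charlie (find_rare_achievements all_achievements alice bob charlie)

-- ===== LEMMAS AND PROOFS =====

-- the counter A's loop body computes for one achievement
def pvCnt (alice bob charlie : List String) (a : String) : Int :=
  let count : Int := 0
  let count := if PySem.Set.contains alice a then count + 1 else count
  let count := if PySem.Set.contains bob a then count + 1 else count
  if PySem.Set.contains charlie a then count + 1 else count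

-- ofList commutes with filter
theorem pv_ofList_filter {α : Type} [BEq α] [LawfulBEq α] (q : α → Bool) (l : List α) :
    PySem.Set.ofList (l.filter q) = (PySem.Set.ofList l).filter q := by
  induction l with
  | nil => rfl
  | cons x xs ih =>
    rw [PySem.Set.ofList_cons]
    cases hq : q x with
    | true =>
      simp only [List.filter_cons, hq, if_pos, PySem.Set.ofList_cons, ih,
        PySem.Set.discard, List.filter_filter]
      refine congrArg (x :: ·) ?_
      exact List.filter_congr (fun y _ => Bool.and_comm _ _)
    | false =>
      have h1 : List.filter q (x :: xs) = List.filter q xs := by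
        simp [hq]
      have h2 : List.filter q (x :: PySem.Set.discard (PySem.Set.ofList xs) x) =
          List.filter q (PySem.Set.discard (PySem.Set.ofList xs) x) := by
        simp [hq]
      rw [h1, h2, ih, PySem.Set.discard, List.filter_filter]
      refine List.filter_congr (fun y _ => ?_)
      cases hyx : (y == x) with
      | true => simp [eq_of_beq hyx, hq]
      | false => simp

theorem find_rare_achievements_eq (all_achievements alice bob charlie : List String) :
    find_rare_achievements all_achievements alice bob charlie =
      find_rare_achievements_alt all_achievements alice bob charlie := by
  show List.foldl
      (fun rare a => if pvCnt alice bob charlie a = 1 then PySem.Set.add rare a else rare)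
      PySem.Set.empty all_achievements = _
  rw [PySem.List.foldl_ite_eq_foldl_filter (p := fun a => pvCnt alice bob charlie a = 1)
    (f := PySem.Set.add)]
  show List.foldl PySem.Set.add [] _ = _
  rw [← PySem.Set.ofList_eq_foldl, pv_ofList_filter]
  show _ = List.filter _ (PySem.Set.ofList all_achievements)
  refine List.filter_congr (fun a _ => ?_)
  rw [Bool.eq_iff_iff]
  simp only [decide_eq_true_eq, PySem.Set.contains_eq_listContains, List.contains_iff_mem,
    PySem.Set.mem_union, PySem.Set.mem_diff, PySem.Set.mem_ofList, pvCnt]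
  by_cases hA : a ∈ alice <;> by_cases hB : a ∈ bob <;> by_cases hC : a ∈ charlie <;>
    simp [hA, hB, hC]

-- ===== VERDICT (by name: the statement is the Claim_ definition above) =====
theorem find_rare_achievements_spec : Claim_equal_find_rare_achievements := by
  intro all_achievements alice bob charlie _
  exact find_rare_achievements_eq all_achievements alice bob charlie
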